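-- pv_equiv track=rewrite | github.com/paperdanes/Indusitry_involution_Agent | UI_funtion/UI_setting_funtion.py | split_policies
-- ===== SOURCE A (Python) =====
-- from typing import Any, Dict, List, Optional
--
-- def split_policies(raw: str) -> List[str]:
--     """
--     优先按空行分隔；若无空行则按以“- ”开头的行切分；否则视为单条。
--     """
--     text = (raw or "").strip()
--     if not text:
--         return []
--
--     blocks = [b.strip() for b in text.split("\n\n") if b.strip()]
--     if len(blocks) >= 2:
--         return blocks
--
--     lines = [ln.rstrip() for ln in text.splitlines()]
--     if sum(1 for ln in lines if ln.strip().startswith("- ")) >= 2: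
--         cur: List[str] = []
--         out: List[str] = []
--         for ln in lines:
--             if ln.strip().startswith("- "):
--                 if cur:
--                     out.append("\n".join(cur).strip())
--                     cur = []
--                 cur.append(ln.strip()[2:])
--             else:
--                 cur.append(ln)
--         if cur:
--             out.append("\n".join(cur).strip())
--         return [x for x in out if x]
--
--     return [text]
-- ===== SOURCE B (Python) =====
-- from typing import List
--
-- def _emit(cur: List[str], acc: List[str]) -> List[str]:
--     b = "\n".join(cur).strip()
--     return [b] + acc if b else acc
--
-- def _blocks(cur: List[str], lines: List[str]) -> List[str]:
--     if not lines:
--         return _emit(cur, [])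
--     ln, rest = lines[0], lines[1:]
--     if ln.strip().startswith("- "):
--         return _emit(cur, _blocks([ln.strip()[2:]], rest))
--     return _blocks(cur + [ln], rest)
--
-- def split_policies(raw: str) -> List[str]:
--     """
--     Same three-way dispatch, but the bullet branch is a recursive segmentation:
--     _blocks builds the output front-to-back, emitting each (inline-filtered)
--     block when its segment ends, instead of an iterative flush-accumulator
--     followed by a final filter pass.
--     """
--     text = raw.strip() if raw else ""
--     if not text:
--         return []
--     blocks = [p for p in (b.strip() for b in text.split("\n\n")) if p]
--     if len(blocks) >= 2:
--         return blocks
--     lines = [ln.rstrip() for ln in text.splitlines()]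
--     if len([ln for ln in lines if ln.strip().startswith("- ")]) >= 2:
--         return _blocks([], lines)
--     return [text]
-- ===== Notes on version B (the rewrite author's own statement) =====
-- stated objective: alternative
-- what changed: The bullet branch is rewritten as a recursive segmentation (_blocks) that builds the output front-to-back, emitting each block with inline empty-filtering when its segment ends, instead of A's iterative flush-accumulator loop plus a final filter pass; the blank-line blocks are computed map-then-filter instead of filter-then-map and the bullet-count guard uses the length of a filtered list instead of a generator sum.
import Mathlib
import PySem

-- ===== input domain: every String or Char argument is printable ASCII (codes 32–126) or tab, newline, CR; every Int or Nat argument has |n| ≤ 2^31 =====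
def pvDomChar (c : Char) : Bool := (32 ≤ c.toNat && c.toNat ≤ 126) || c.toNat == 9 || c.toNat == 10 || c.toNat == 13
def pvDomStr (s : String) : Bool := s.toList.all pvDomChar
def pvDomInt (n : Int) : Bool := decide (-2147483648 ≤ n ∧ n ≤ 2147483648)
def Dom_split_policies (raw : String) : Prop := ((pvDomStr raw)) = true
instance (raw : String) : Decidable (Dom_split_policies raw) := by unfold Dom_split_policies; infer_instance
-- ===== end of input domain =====

-- B keeps the three-way dispatch but replaces A's bullet loop (flush-accumulator
-- + final filter pass) by a recursive segmentation that emits each block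
-- front-to-back with inline filtering (objective: alternative decomposition).

-- ===== PORT A =====
-- A's loop body: `for ln in lines: if ln.strip().startswith("- "): (flush cur) ; cur=[ln.strip()[2:]] else cur.append(ln)`
def pvStepA (st : List String × List String) (ln : String) : List String × List String :=
  if PySem.Str.startswith (PySem.Str.strip ln) "- " then
    ([PySem.Str.slice (PySem.Str.strip ln) (some 2) none],
     if st.1 ≠ [] then st.2 ++ [PySem.Str.strip (PySem.Str.join "\n" st.1)] else st.2)
  else (st.1 ++ [ln], st.2)

def split_policies (raw : String) : List String :=
  let text := PySem.Str.strip (if raw = "" then "" else raw)   -- (raw or "").strip()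
  if text = "" then []
  else
    -- text.split("\n\n"): the separator is the nonempty literal "\n\n", so split? is `some`; getD unwraps it
    let blocks := (((PySem.Str.split? text "\n\n").getD []).filter
        (fun b => PySem.Str.strip b != "")).map PySem.Str.strip
    if blocks.length ≥ 2 then blocks
    else
      let lines := (PySem.Str.splitlines text).map PySem.Str.rstrip
      if (lines.countP (fun ln => PySem.Str.startswith (PySem.Str.strip ln) "- ")) ≥ 2 then
        let st := lines.foldl pvStepA ([], [])
        let out := if st.1 ≠ [] then st.2 ++ [PySem.Str.strip (PySem.Str.join "\n" st.1)] else st.2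
        out.filter (fun x => x != "")
      else [text]

-- ===== PORT B =====
-- `_emit(cur, acc)`: prepend the cleaned segment text if nonempty
def pvEmit (cur acc : List String) : List String :=
  let b := PySem.Str.strip (PySem.Str.join "\n" cur)
  if b != "" then b :: acc else acc

-- `_blocks(cur, lines)`: recursive segmentation, output built front-to-back
def pvBlocks (cur : List String) : List String → List String
  | [] => pvEmit cur []
  | ln :: rest =>
      if PySem.Str.startswith (PySem.Str.strip ln) "- " then
        pvEmit cur (pvBlocks [PySem.Str.slice (PySem.Str.strip ln) (some 2) none] rest)
      else pvBlocks (cur ++ [ln]) rest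

def split_policies_alt (raw : String) : List String :=
  let text := if raw = "" then "" else PySem.Str.strip raw   -- raw.strip() if raw else ""
  if text = "" then []
  else
    -- [p for p in (b.strip() for b in text.split("\n\n")) if p]
    let blocks := (((PySem.Str.split? text "\n\n").getD []).map PySem.Str.strip).filter
        (fun p => p != "")
    if blocks.length ≥ 2 then blocks
    else
      let lines := (PySem.Str.splitlines text).map PySem.Str.rstrip
      -- len([ln for ln in lines if ln.strip().startswith("- ")]) >= 2
      if (lines.filter (fun ln => PySem.Str.startswith (PySem.Str.strip ln) "- ")).length ≥ 2 then
        pvBlocks [] lines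
      else [text]

-- ===== PRECONDITION & SPEC =====
def Spec_split_policies (raw : String) (out : List String) : Prop := out = split_policies_alt raw
instance (raw : String) (out : List String) : Decidable (Spec_split_policies raw out) := by unfold Spec_split_policies; infer_instance

-- ===== CLAIM =====
def Claim_equal_split_policies : Prop := ∀ (raw : String), Dom_split_policies raw → Spec_split_policies raw (split_policies raw)

-- ===== LEMMAS AND PROOFS =====
def pvClean (cur : List String) : String := PySem.Str.strip (PySem.Str.join "\n" cur)

theorem pvEmit_eq (cur acc : List String) :
    pvEmit cur acc = if pvClean cur != "" then pvClean cur :: acc else acc := rfl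

theorem pvClean_nil : pvClean [] = "" := by decide

theorem pvEmit_nil_cur (acc : List String) : pvEmit [] acc = acc := by
  rw [pvEmit_eq, pvClean_nil]; simp

theorem pv_filter_singleton (y : String) :
    List.filter (fun x => x != "") [y] = if y != "" then [y] else [] := by
  cases h : (y != "") <;> simp [List.filter, h]

theorem pvStepA_pos (cur out : List String) (ln : String)
    (hb : PySem.Str.startswith (PySem.Str.strip ln) "- " = true) :
    pvStepA (cur, out) ln
      = ([PySem.Str.slice (PySem.Str.strip ln) (some 2) none],
         if cur ≠ [] then out ++ [pvClean cur] else out) := by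
  simp only [pvStepA, pvClean, hb, if_pos]

theorem pvStepA_neg (cur out : List String) (ln : String)
    (hb : ¬ PySem.Str.startswith (PySem.Str.strip ln) "- " = true) :
    pvStepA (cur, out) ln = (cur ++ [ln], out) := by
  simp only [pvStepA]; rw [if_neg hb]

theorem pvBlocks_cons_pos (cur : List String) (ln : String) (ls : List String)
    (hb : PySem.Str.startswith (PySem.Str.strip ln) "- " = true) :
    pvBlocks cur (ln :: ls)
      = pvEmit cur (pvBlocks [PySem.Str.slice (PySem.Str.strip ln) (some 2) none] ls) := by
  rw [pvBlocks, if_pos hb]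

theorem pvBlocks_cons_neg (cur : List String) (ln : String) (ls : List String)
    (hb : ¬ PySem.Str.startswith (PySem.Str.strip ln) "- " = true) :
    pvBlocks cur (ln :: ls) = pvBlocks (cur ++ [ln]) ls := by
  rw [pvBlocks, if_neg hb]

-- A's loop (started from state (cur, out)) followed by the final flush and filter
-- equals the already-filtered `out` prefix followed by B's recursive segmentation.
theorem pv_A_loop (lines : List String) : ∀ (cur out : List String),
    List.filter (fun x => x != "")
      (if (List.foldl pvStepA (cur, out) lines).1 ≠ [] then
         (List.foldl pvStepA (cur, out) lines).2 ++ [pvClean (List.foldl pvStepA (cur, out) lines).1]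
       else (List.foldl pvStepA (cur, out) lines).2)
      = List.filter (fun x => x != "") out ++ pvBlocks cur lines := by
  induction lines with
  | nil =>
      intro cur out
      simp only [List.foldl_nil, pvBlocks]
      by_cases h : cur = []
      · subst h; simp [pvEmit_nil_cur]
      · rw [if_pos h, List.filter_append, pv_filter_singleton, pvEmit_eq]
  | cons ln ls ih =>
      intro cur out
      rw [List.foldl_cons]
      by_cases hb : PySem.Str.startswith (PySem.Str.strip ln) "- " = true
      · rw [pvStepA_pos cur out ln hb, pvBlocks_cons_pos cur ln ls hb]
        by_cases h : cur = []
        · subst h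
          have e : (if ([] : List String) ≠ [] then out ++ [pvClean []] else out) = out :=
            if_neg (by simp)
          rw [e, ih, pvEmit_nil_cur]
        · rw [if_pos h, ih, List.filter_append, pv_filter_singleton,
              List.append_assoc, pvEmit_eq]
          split <;> simp
      · rw [pvStepA_neg cur out ln hb, pvBlocks_cons_neg cur ln ls hb]
        exact ih (cur ++ [ln]) out

-- filter-then-map (A's blocks comprehension) equals map-then-filter (B's)
theorem pv_blocks_eq (l : List String) :
    (l.filter (fun b => PySem.Str.strip b != "")).map PySem.Str.strip
      = (l.map PySem.Str.strip).filter (fun p => p != "") := by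
  induction l with
  | nil => rfl
  | cons b bs ih =>
      by_cases h : (PySem.Str.strip b != "") = true <;>
        simp [List.filter, h, ih]

theorem pv_count_eq (l : List String) (p : String → Bool) :
    l.countP p = (l.filter p).length := List.countP_eq_length_filter ..

theorem pv_text_eq (raw : String) :
    PySem.Str.strip (if raw = "" then "" else raw)
      = (if raw = "" then "" else PySem.Str.strip raw) := by
  split <;> rfl

-- ===== VERDICT =====
theorem split_policies_spec : Claim_equal_split_policies := by
  intro raw _
  unfold Spec_split_policies split_policies split_policies_alt
  simp only []
  rw [pv_text_eq]
  generalize (if raw = "" then "" else PySem.Str.strip raw) = text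
  by_cases h1 : text = ""
  · rw [if_pos h1, if_pos h1]
  · rw [if_neg h1, if_neg h1, pv_blocks_eq]
    by_cases h2 : ((((PySem.Str.split? text "\n\n").getD []).map PySem.Str.strip).filter
        (fun p => p != "")).length ≥ 2
    · rw [if_pos h2, if_pos h2]
    · rw [if_neg h2, if_neg h2, pv_count_eq]
      by_cases h3 : (((PySem.Str.splitlines text).map PySem.Str.rstrip).filter
          (fun ln => PySem.Str.startswith (PySem.Str.strip ln) "- ")).length ≥ 2
      · rw [if_pos h3, if_pos h3]
        have := pv_A_loop ((PySem.Str.splitlines text).map PySem.Str.rstrip) [] []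
        simpa using this
      · rw [if_neg h3, if_neg h3]
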